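-- pv_equiv track=rewrite | github.com/Gneroso/university_projects | arhitecure/hmw2/substraction/one_complement.py | one_complement
-- ===== SOURCE A (Python) =====
-- def one_complement(first, second):
--   first = first[::-1]
--   second = second[::-1]
--   third = []
--
--   borrowed = 0
--   for index, second_bit in enumerate(second):
--     result = int(first[index]) - int(second_bit) - borrowed
--     if result < 0:
--       borrowed = 1
--       result *= -1
--     else:
--       borrowed = 0
--
--     third.append(str(result))
--
--   index += 1
--
--   while index < len(first):
--     result = int(first[index]) - borrowed
--     if result < 0:
--       borrowed = 1
--       result *= -1
--     else:
--       borrowed = 0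
--
--     third.append(str(result))
--     index += 1
--
--   result = ''.join(third)[::-1]
--   if borrowed == 1:
--     return one_complement(result, '1')
--
--   return result
-- ===== SOURCE B (Python) =====
-- def one_complement(first, second):
--     # Iterative version: pad the (reversed) subtrahend with zeros to the minuend's
--     # width and do one scan over it, with an explicit end-around-borrow loop
--     # instead of recursion.
--     res, sub = first, second
--     while True:
--         f = res[::-1]
--         s = sub[::-1].ljust(len(res), '0')
--         digits = []
--         borrow = 0
--         for i, sd in enumerate(s):
--             d = int(f[i]) - int(sd) - borrow
--             borrow = 1 if d < 0 else 0
--             digits.append(str(abs(d)))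
--         res = ''.join(digits)[::-1]
--         if borrow == 0:
--             return res
--         sub = '1'
-- ===== Notes on version B (the rewrite author's own statement) =====
-- stated objective: alternative
-- what changed: A's two scan phases (for-loop over second, then a tail while-loop over the rest of first) are merged into one scan over the subtrahend zero-padded to the minuend's width, and the recursive end-around borrow is replaced by an explicit outer while loop that re-subtracts '1'.
-- crash fix: On an empty second (with first all digits) A raises UnboundLocalError ('index' is never bound); B returns first unchanged, the result of subtracting nothing. — e.g. on one_complement("101", ""): A raises UnboundLocalError, B returns "101"
import Mathlib
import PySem

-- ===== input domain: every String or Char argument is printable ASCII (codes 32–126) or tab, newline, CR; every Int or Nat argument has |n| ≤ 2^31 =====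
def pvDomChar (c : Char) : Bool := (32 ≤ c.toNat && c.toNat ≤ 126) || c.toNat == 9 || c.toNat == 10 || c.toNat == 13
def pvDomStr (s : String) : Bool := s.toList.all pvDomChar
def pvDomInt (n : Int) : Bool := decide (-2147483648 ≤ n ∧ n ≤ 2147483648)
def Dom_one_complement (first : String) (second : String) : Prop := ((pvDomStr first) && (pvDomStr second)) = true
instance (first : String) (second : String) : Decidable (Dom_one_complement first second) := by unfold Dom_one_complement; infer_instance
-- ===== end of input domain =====

-- B keeps the bit-by-bit subtraction but replaces A's two scan phases by one scan
-- over the zero-padded subtrahend, and the end-around-borrow recursion by an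
-- explicit outer loop (objective: alternative decomposition).

-- ===== PORT A =====

-- int(c) for a one-character string; the getD default is never reached under
-- Pre_one_complement (all accessed characters are ASCII digits).
def pvDigit (c : Char) : Int := (PySem.Int.ofChars? [c]).getD 0

-- one full pass of A's body (reversed scan: the for-loop over second, then the tail
-- while-loop over the rest of first), returning (''.join(third)[::-1], borrowed)
def one_complement_passA (first second : List Char) : List Char × Int :=
  let f := first.reverse
  let s := second.reverse
  let st1 := (PySem.List.enumerate s).foldl
    (fun (acc : Int × List (List Char)) p =>
      let result := pvDigit (PySem.List.pyGetD f p.1 '0') - pvDigit p.2 - acc.1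
      if result < 0 then (1, acc.2 ++ [PySem.Int.toChars (-result)])
      else (0, acc.2 ++ [PySem.Int.toChars result]))
    (0, [])
  let st2 := (PySem.List.pyRange (s.length : Int) (f.length : Int) 1).foldl
    (fun (acc : Int × List (List Char)) i =>
      let result := pvDigit (PySem.List.pyGetD f i '0') - acc.1
      if result < 0 then ((1 : Int), acc.2 ++ [PySem.Int.toChars (-result)])
      else (0, acc.2 ++ [PySem.Int.toChars result]))
    st1
  ((PySem.Chars.join [] st2.2).reverse, st2.1)

-- A's recursion one_complement(result, '1') unrolled: under Pre_ it is at most three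
-- calls deep (a final borrow makes the leading result digit nonzero, so the second
-- end-around pass never borrows again); each level is the literal pass above.
def one_complement (first : String) (second : String) : String :=
  let r1 := one_complement_passA first.toList second.toList
  if r1.2 = 1 then
    let r2 := one_complement_passA r1.1 ['1']
    if r2.2 = 1 then String.ofList (one_complement_passA r2.1 ['1']).1
    else String.ofList r2.1
  else String.ofList r1.1

-- ===== PORT B =====

-- one pass of B's loop body: the reversed subtrahend zero-padded to the minuend's
-- width, one scan over it; returns (''.join(digits)[::-1], borrow).
-- sub[::-1].ljust(len(res), '0') is ported by hand and is exact for this call: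
-- pad on the right with '0' up to first.length, unchanged when already that long.
def one_complement_passB (first second : List Char) : List Char × Int :=
  let f := first.reverse
  let s := second.reverse ++ List.replicate (first.length - second.length) '0'
  let st := (PySem.List.enumerate s).foldl
    (fun (acc : Int × List (List Char)) p =>
      let d := pvDigit (PySem.List.pyGetD f p.1 '0') - pvDigit p.2 - acc.1
      ((if d < 0 then 1 else 0), acc.2 ++ [PySem.Int.toChars |d|]))
    (0, [])
  ((PySem.Chars.join [] st.2).reverse, st.1)

-- B's 'while True' outer loop unrolled to the same bound (≤ 3 iterations under Pre_)
def one_complement_alt (first : String) (second : String) : String :=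
  let p1 := one_complement_passB first.toList second.toList
  if p1.2 = 0 then String.ofList p1.1
  else
    let p2 := one_complement_passB p1.1 ['1']
    if p2.2 = 0 then String.ofList p2.1
    else String.ofList (one_complement_passB p2.1 ['1']).1

-- ===== PRECONDITION & SPEC =====

-- Exactly the inputs on which Python A returns: every character of both strings an
-- ASCII digit (otherwise int() raises ValueError), second nonempty (otherwise the
-- 'index += 1' raises UnboundLocalError) and no longer than first (otherwise IndexError).
def Pre_one_complement (first : String) (second : String) : Prop :=
  second.toList ≠ [] ∧ second.toList.length ≤ first.toList.length ∧
  first.toList.all (fun c => c.isDigit) = true ∧ second.toList.all (fun c => c.isDigit) = true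

instance (first : String) (second : String) : Decidable (Pre_one_complement first second) := by
  unfold Pre_one_complement; infer_instance

def pvWitness_one_complement : String × String := ("1010", "11")

-- On an empty second (with first made of digits) A raises UnboundLocalError ('index' never
-- bound); B returns first unchanged, the value of subtracting nothing.
def Raises_one_complement (first : String) (second : String) : Prop :=
  second.toList = [] ∧ first.toList.all (fun c => c.isDigit) = true
instance (first : String) (second : String) : Decidable (Raises_one_complement first second) := by
  unfold Raises_one_complement; infer_instance
def pvRaiseWitness_one_complement : String × String := ("101", "")
def pvRaiseWitnessOut_one_complement : String := "101"

def Spec_one_complement (first : String) (second : String) (out : String) : Prop := out = one_complement_alt first second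
instance (first : String) (second : String) (out : String) : Decidable (Spec_one_complement first second out) := by unfold Spec_one_complement; infer_instance

-- ===== CLAIM (what is proved, stated in full; the proofs are below) =====
def Claim_equal_one_complement : Prop := ∀ (first : String) (second : String), Dom_one_complement first second → Pre_one_complement first second → Spec_one_complement first second (one_complement first second)
def Claim_raises_one_complement : Prop := (∀ (first : String) (second : String), Dom_one_complement first second → Raises_one_complement first second → ¬ Pre_one_complement first second) ∧ (Dom_one_complement (pvRaiseWitness_one_complement.1) (pvRaiseWitness_one_complement.2) ∧ Raises_one_complement (pvRaiseWitness_one_complement.1) (pvRaiseWitness_one_complement.2) ∧ one_complement_alt (pvRaiseWitness_one_complement.1) (pvRaiseWitness_one_complement.2) = pvRaiseWitnessOut_one_complement)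

-- ===== LEMMAS AND PROOFS =====

-- named forms of the three loop bodies (used only by the proofs)
def pvStepA1 (f : List Char) (acc : Int × List (List Char)) (p : Int × Char) : Int × List (List Char) :=
  if pvDigit (PySem.List.pyGetD f p.1 '0') - pvDigit p.2 - acc.1 < 0 then
    (1, acc.2 ++ [PySem.Int.toChars (-(pvDigit (PySem.List.pyGetD f p.1 '0') - pvDigit p.2 - acc.1))])
  else (0, acc.2 ++ [PySem.Int.toChars (pvDigit (PySem.List.pyGetD f p.1 '0') - pvDigit p.2 - acc.1)])

def pvStepA2 (f : List Char) (acc : Int × List (List Char)) (i : Int) : Int × List (List Char) :=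
  if pvDigit (PySem.List.pyGetD f i '0') - acc.1 < 0 then
    ((1 : Int), acc.2 ++ [PySem.Int.toChars (-(pvDigit (PySem.List.pyGetD f i '0') - acc.1))])
  else (0, acc.2 ++ [PySem.Int.toChars (pvDigit (PySem.List.pyGetD f i '0') - acc.1)])

def pvStepB (f : List Char) (acc : Int × List (List Char)) (p : Int × Char) : Int × List (List Char) :=
  ((if pvDigit (PySem.List.pyGetD f p.1 '0') - pvDigit p.2 - acc.1 < 0 then 1 else 0),
   acc.2 ++ [PySem.Int.toChars |pvDigit (PySem.List.pyGetD f p.1 '0') - pvDigit p.2 - acc.1|])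

theorem pv_passA_eq_steps (a b : List Char) :
    one_complement_passA a b =
      ((PySem.Chars.join []
        ((PySem.List.pyRange (b.reverse.length : Int) (a.reverse.length : Int) 1).foldl
          (pvStepA2 a.reverse)
          ((PySem.List.enumerate b.reverse).foldl (pvStepA1 a.reverse) (0, []))).2).reverse,
       ((PySem.List.pyRange (b.reverse.length : Int) (a.reverse.length : Int) 1).foldl
          (pvStepA2 a.reverse)
          ((PySem.List.enumerate b.reverse).foldl (pvStepA1 a.reverse) (0, []))).1) := rfl

theorem pv_passB_eq_steps (a b : List Char) :
    one_complement_passB a b =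
      ((PySem.Chars.join []
        ((PySem.List.enumerate (b.reverse ++ List.replicate (a.length - b.length) '0')).foldl
          (pvStepB a.reverse) (0, [])).2).reverse,
       ((PySem.List.enumerate (b.reverse ++ List.replicate (a.length - b.length) '0')).foldl
          (pvStepB a.reverse) (0, [])).1) := rfl

-- enumerate as an indexed range (lets A's for-loop and B's padded scan meet)
theorem pv_enumerate_eq_map {α : Type} (d : α) (xs : List α) : ∀ (k : Int),
    PySem.List.enumerate xs k
      = (PySem.List.pyRange k (k + xs.length) 1).map (fun i => (i, PySem.List.pyGetD xs (i - k) d)) := by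
  induction xs with
  | nil => intro k; simp [PySem.List.enumerate, PySem.List.pyRange_one_eq_nil]
  | cons x t ih =>
    intro k
    rw [PySem.List.enumerate_cons, PySem.List.pyRange_one_cons (by push_cast [List.length_cons]; omega)]
    simp only [List.map_cons, sub_self]
    rw [List.cons.injEq]
    refine ⟨by simp [PySem.List.pyGetD_zero_cons], ?_⟩
    rw [ih (k + 1)]
    rw [show (k + (((x :: t).length : Int))) = k + 1 + (t.length : Int) by push_cast [List.length_cons]; omega]
    apply List.map_congr_left
    intro i hi
    rw [PySem.List.mem_pyRange_one] at hi
    rw [Prod.mk.injEq]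
    refine ⟨rfl, ?_⟩
    obtain ⟨n, hn⟩ : ∃ n : Nat, i - (k+1) = (n : Int) := ⟨(i-(k+1)).toNat, by omega⟩
    rw [show i - k = ((n+1 : Nat) : Int) by push_cast; omega, hn,
        PySem.List.pyGetD_natCast, PySem.List.pyGetD_natCast]
    simp [List.getD]

theorem pv_stepB_eq_A1 (f : List Char) (acc : Int × List (List Char)) (p : Int × Char) :
    pvStepB f acc p = pvStepA1 f acc p := by
  unfold pvStepB pvStepA1
  by_cases hd : pvDigit (PySem.List.pyGetD f p.1 '0') - pvDigit p.2 - acc.1 < 0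
  · rw [if_pos hd, if_pos hd, abs_of_neg hd]
  · rw [if_neg hd, if_neg hd, abs_of_nonneg (by omega)]

theorem pv_digit_zero : pvDigit '0' = 0 := by decide

theorem pv_stepB_eq_A2 (f : List Char) (acc : Int × List (List Char)) (i : Int) :
    pvStepB f acc (i, '0') = pvStepA2 f acc i := by
  simp only [pvStepB, pvStepA2, pv_digit_zero, sub_zero]
  by_cases hd : pvDigit (PySem.List.pyGetD f i '0') - acc.1 < 0
  · rw [if_pos hd, if_pos hd, abs_of_neg hd]
  · rw [if_neg hd, if_neg hd, abs_of_nonneg (by omega)]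

theorem pv_replicate_getD (k m : Nat) : (List.replicate k '0').getD m '0' = '0' := by
  by_cases hm : m < k <;> simp [List.getD, hm]

-- the central lemma: one pass of A equals one pass of B (any inputs with len second ≤ len first)
theorem pv_pass_eq (first second : List Char) (h : second.length ≤ first.length) :
    one_complement_passA first second = one_complement_passB first second := by
  rw [pv_passA_eq_steps, pv_passB_eq_steps]
  rw [pv_enumerate_eq_map '0' second.reverse 0,
      pv_enumerate_eq_map '0' (second.reverse ++ List.replicate (first.length - second.length) '0') 0]
  simp only [zero_add, sub_zero, List.foldl_map]
  have hpadlen : (((second.reverse ++ List.replicate (first.length - second.length) '0').length : Nat) : Int)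
      = (first.reverse.length : Int) := by
    simp; omega
  rw [hpadlen]
  rw [PySem.List.pyRange_one_append 0 (second.reverse.length : Int) (first.reverse.length : Int)
        (by positivity) (by simp; exact_mod_cast h),
      List.foldl_append]
  have h1 : (PySem.List.pyRange 0 (second.reverse.length : Int) 1).foldl
        (fun acc i => pvStepB first.reverse acc
          (i, PySem.List.pyGetD (second.reverse ++ List.replicate (first.length - second.length) '0') i '0')) (0, [])
      = (PySem.List.pyRange 0 (second.reverse.length : Int) 1).foldl
        (fun acc i => pvStepA1 first.reverse acc (i, PySem.List.pyGetD second.reverse i '0')) (0, []) := by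
    apply PySem.List.foldl_congr_mem
    intro acc i hi
    rw [PySem.List.mem_pyRange_one] at hi
    obtain ⟨n, hn⟩ : ∃ n : Nat, i = (n : Int) := ⟨i.toNat, by omega⟩
    have hnlt : n < second.reverse.length := by omega
    rw [hn, PySem.List.pyGetD_natCast, PySem.List.pyGetD_natCast,
        List.getD_append _ _ _ _ hnlt, pv_stepB_eq_A1]
  rw [h1]
  have h2 : ∀ init, (PySem.List.pyRange (second.reverse.length : Int) (first.reverse.length : Int) 1).foldl
        (pvStepA2 first.reverse) init
      = (PySem.List.pyRange (second.reverse.length : Int) (first.reverse.length : Int) 1).foldl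
        (fun acc i => pvStepB first.reverse acc
          (i, PySem.List.pyGetD (second.reverse ++ List.replicate (first.length - second.length) '0') i '0')) init := by
    intro init
    apply PySem.List.foldl_congr_mem
    intro acc i hi
    rw [PySem.List.mem_pyRange_one] at hi
    obtain ⟨n, hn⟩ : ∃ n : Nat, i = (n : Int) := ⟨i.toNat, by omega⟩
    have hnge : second.reverse.length ≤ n := by omega
    rw [hn, PySem.List.pyGetD_natCast, List.getD_append_right _ _ _ _ hnge,
        pv_replicate_getD, pv_stepB_eq_A2]
  rw [h2]

-- str(n) is never empty
theorem pv_core_step (b f n : Nat) (ds : List Char) :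
    Nat.toDigitsCore b (f+1) n ds
      = (if n / b = 0 then (n % b).digitChar :: ds else Nat.toDigitsCore b f (n / b) ((n % b).digitChar :: ds)) := rfl

theorem pv_core_len (b : Nat) : ∀ (fuel n : Nat) (ds : List Char), ds.length ≤ (Nat.toDigitsCore b fuel n ds).length := by
  intro fuel
  induction fuel with
  | zero => intro n ds; simp [Nat.toDigitsCore]
  | succ f ih =>
    intro n ds
    rw [pv_core_step]
    split
    · simp
    · exact le_trans (by simp) (ih (n / b) ((n % b).digitChar :: ds))

theorem pv_toChars_ne_nil (m : Int) : PySem.Int.toChars m ≠ [] := by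
  unfold PySem.Int.toChars
  split
  · simp
  · intro h
    have h2 : 1 ≤ (Nat.toDigits 10 m.toNat).length := by
      unfold Nat.toDigits
      rw [pv_core_step]
      split
      · simp
      · exact le_trans (by simp) (pv_core_len 10 m.toNat _ _)
    rw [h] at h2; simp at h2

theorem pv_join_nil_eq_flatten (l : List (List Char)) : PySem.Chars.join [] l = l.flatten := by
  unfold PySem.Chars.join List.intercalate
  induction l with
  | nil => rfl
  | cons x t ih => cases t with
    | nil => rfl
    | cons y u => simp [List.intersperse] at *; simpa using ih

-- every element produced by B's loop is some str(n), and one element per index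
theorem pv_foldB_snd (f : List Char) : ∀ (l : List (Int × Char)) (acc : Int × List (List Char)),
    (l.foldl (pvStepB f) acc).2.length = acc.2.length + l.length ∧
    (∀ c ∈ (l.foldl (pvStepB f) acc).2, c ∈ acc.2 ∨ ∃ m : Int, c = PySem.Int.toChars m) := by
  intro l
  induction l with
  | nil => intro acc; rw [List.foldl_nil]; exact ⟨by simp, fun c hc => Or.inl hc⟩
  | cons p t ih =>
    intro acc
    rw [List.foldl_cons]
    refine ⟨?_, ?_⟩
    · rw [(ih (pvStepB f acc p)).1]; unfold pvStepB; simp; omega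
    · intro c hc
      rcases (ih (pvStepB f acc p)).2 c hc with hmem | hm
      · unfold pvStepB at hmem
        simp only [List.mem_append, List.mem_singleton] at hmem
        rcases hmem with hmem | hmem
        · exact Or.inl hmem
        · exact Or.inr ⟨_, hmem⟩
      · exact Or.inr hm

-- the result of a pass over a nonempty minuend is nonempty
theorem pv_passB_ne_nil (first second : List Char) (h : first ≠ []) :
    (one_complement_passB first second).1 ≠ [] := by
  rw [pv_passB_eq_steps]
  simp only
  rw [pv_join_nil_eq_flatten]
  intro hnil
  rw [List.reverse_eq_nil_iff, List.flatten_eq_nil_iff] at hnil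
  have hlen := (pv_foldB_snd first.reverse
    (PySem.List.enumerate (second.reverse ++ List.replicate (first.length - second.length) '0')) (0, [])).1
  have hmem := (pv_foldB_snd first.reverse
    (PySem.List.enumerate (second.reverse ++ List.replicate (first.length - second.length) '0')) (0, [])).2
  set res := (PySem.List.enumerate (second.reverse ++ List.replicate (first.length - second.length) '0')).foldl
    (pvStepB first.reverse) (0, ([] : List (List Char)))
  have hpos : 0 < res.2.length := by
    have hfp : 0 < first.length := List.length_pos_of_ne_nil h
    rw [hlen, PySem.List.length_enumerate]
    simp
    omega
  obtain ⟨c, hc⟩ := List.exists_mem_of_length_pos hpos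
  rcases hmem c hc with h0 | ⟨m, hm⟩
  · simp at h0
  · exact pv_toChars_ne_nil m (by rw [← hm]; exact hnil c hc)

-- B's borrow flag is always 0 or 1
theorem pv_foldB_borrow (f : List Char) : ∀ (l : List (Int × Char)) (acc : Int × List (List Char)),
    acc.1 = 0 ∨ acc.1 = 1 → (l.foldl (pvStepB f) acc).1 = 0 ∨ (l.foldl (pvStepB f) acc).1 = 1 := by
  intro l
  induction l with
  | nil => intro acc hacc; simpa using hacc
  | cons p t ih =>
    intro acc hacc
    rw [List.foldl_cons]
    apply ih
    rcases lt_or_ge (pvDigit (PySem.List.pyGetD f p.1 '0') - pvDigit p.2 - acc.1) 0 with hd | hd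
    · right; simp [pvStepB]; linarith
    · left; simp [pvStepB]; linarith

theorem pv_passB_borrow (first second : List Char) :
    (one_complement_passB first second).2 = 0 ∨ (one_complement_passB first second).2 = 1 := by
  rw [pv_passB_eq_steps]
  exact pv_foldB_borrow _ _ _ (Or.inl rfl)

-- ===== VERDICT (by name: the statement is the Claim_ definition above) =====
theorem one_complement_spec : Claim_equal_one_complement := by
  intro first second _hdom hpre
  obtain ⟨hne, hlen, _, _⟩ := hpre
  unfold Spec_one_complement
  simp only [one_complement, one_complement_alt]
  have hfne : first.toList ≠ [] := by
    intro h0; rw [h0] at hlen; simp at hlen; exact hne (by simp [hlen])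
  rw [pv_pass_eq first.toList second.toList hlen]
  set p1 := one_complement_passB first.toList second.toList with hp1
  have h1ne : p1.1 ≠ [] := pv_passB_ne_nil _ _ hfne
  have h1len : (['1'] : List Char).length ≤ p1.1.length := by
    simpa using List.length_pos_of_ne_nil h1ne
  rw [pv_pass_eq p1.1 ['1'] h1len]
  set p2 := one_complement_passB p1.1 ['1'] with hp2
  have h2ne : p2.1 ≠ [] := pv_passB_ne_nil _ _ h1ne
  have h2len : (['1'] : List Char).length ≤ p2.1.length := by
    simpa using List.length_pos_of_ne_nil h2ne
  rw [pv_pass_eq p2.1 ['1'] h2len]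
  rcases pv_passB_borrow first.toList second.toList with hb1 | hb1 <;>
    rw [← hp1] at hb1
  · rw [if_neg (show ¬ p1.2 = 1 by rw [hb1]; decide), if_pos hb1]
  · rw [if_pos hb1, if_neg (show ¬ p1.2 = 0 by rw [hb1]; decide)]
    rcases pv_passB_borrow p1.1 ['1'] with hb2 | hb2 <;> rw [← hp2] at hb2
    · rw [if_neg (show ¬ p2.2 = 1 by rw [hb2]; decide), if_pos hb2]
    · rw [if_pos hb2, if_neg (show ¬ p2.2 = 0 by rw [hb2]; decide)]

@[simp] theorem one_complement_raises : Claim_raises_one_complement := by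
  unfold Claim_raises_one_complement
  exact ⟨fun first second _ hr hp => hp.1 hr.1, by decide⟩
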